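-- pv_equiv track=rewrite | github.com/yc424k/LLaVA-Sensing | stage0_data_processing/data_generation/novel_corpus_processor.py | split_into_passages
-- ===== SOURCE A (Python) =====
-- from typing import Dict, List, Tuple, Optional
--
-- def split_into_passages(content: str, min_length: int = 150, max_length: int = 500) -> List[str]:
--     """
--     Split novel content into manageable passages.
--
--     Args:
--         content: Novel text content
--         min_length: Minimum passage length
--         max_length: Maximum passage length
--
--     Returns:
--         list: Text passages
--     """
--     passages = []
--
--     # First split by paragraphs (double newlines)
--     paragraphs = content.split('\n\n')
--
--     current_passage = ""
--
--     for paragraph in paragraphs: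
--         paragraph = paragraph.strip()
--         if not paragraph:
--             continue
--
--         # Check if adding this paragraph would exceed max_length
--         if len(current_passage) + len(paragraph) > max_length:
--             # Save current passage if it meets minimum length
--             if len(current_passage) >= min_length:
--                 passages.append(current_passage.strip())
--
--             # Start new passage
--             current_passage = paragraph
--         else:
--             # Add to current passage
--             if current_passage:
--                 current_passage += "\n\n" + paragraph
--             else:
--                 current_passage = paragraph
--
--     # Don't forget the last passage
--     if len(current_passage) >= min_length:
--         passages.append(current_passage.strip())
--
--     return passages
-- ===== SOURCE B (Python) =====
-- def split_into_passages(content: str, min_length: int = 150, max_length: int = 500):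
--     # Group-at-a-time recursion: repeatedly peel off one maximal passage-group
--     # from the front of the paragraph list, join it, then filter by min_length.
--     paras = [q for q in (p.strip() for p in content.split('\n\n')) if q]
--
--     def take_group(items):
--         group, length, i = [items[0]], len(items[0]), 1
--         while i < len(items) and length + len(items[i]) <= max_length:
--             length += 2 + len(items[i])
--             group.append(items[i])
--             i += 1
--         return '\n\n'.join(group), items[i:]
--
--     passages = []
--     rest = paras
--     while rest:
--         passage, rest = take_group(rest)
--         passages.append(passage)
--     return [s for s in passages if len(s) >= min_length]
-- ===== Notes on version B (the rewrite author's own statement) =====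
-- stated objective: alternative
-- what changed: Replaces A's single paragraph-at-a-time loop over a growing string with interleaved min-length checks by a group-at-a-time recursion: take_group peels one maximal passage group off the front of the precomputed paragraph list (tracking the joined length arithmetically), the outer loop collects the joined passages, and min_length is applied in one final filter.
-- intended difference: When min_length <= 0 and the content has no non-empty stripped paragraph or its first one alone exceeds max_length, A prepends a spurious empty-string passage (the stripped empty initial accumulator) to the result; B omits it, since an empty passage is never an intended output of a text splitter. — e.g. on split_into_passages("hey", 0, 2): A returns ["", "hey"], B returns ["hey"]
import Mathlib
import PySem

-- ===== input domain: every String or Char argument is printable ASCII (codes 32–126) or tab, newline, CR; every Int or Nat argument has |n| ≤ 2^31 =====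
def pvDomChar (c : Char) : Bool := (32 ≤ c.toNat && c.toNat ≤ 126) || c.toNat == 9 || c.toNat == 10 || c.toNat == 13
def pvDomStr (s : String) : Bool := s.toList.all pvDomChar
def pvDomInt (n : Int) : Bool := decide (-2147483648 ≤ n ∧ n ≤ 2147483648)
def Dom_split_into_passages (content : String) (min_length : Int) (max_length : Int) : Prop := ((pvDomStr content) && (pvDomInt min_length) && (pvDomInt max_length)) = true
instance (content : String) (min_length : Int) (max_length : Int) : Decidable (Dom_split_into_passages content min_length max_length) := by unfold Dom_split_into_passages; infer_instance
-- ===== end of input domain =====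

-- B peels one maximal passage group at a time off the paragraph list (recursion over
-- groups, joined length tracked arithmetically) and filters by min_length once at the
-- end; outside D_ below it returns exactly A's value.

-- ===== PORT A =====
-- body of A's loop after the strip/skip of the paragraph (state = (passages, current_passage))
def pvStepA (min_length max_length : Int) (st : List (List Char) × List Char) (p : List Char) :
    List (List Char) × List Char :=
  if max_length < (st.2.length : Int) + (p.length : Int) then
    ((if min_length ≤ (st.2.length : Int) then st.1 ++ [PySem.Chars.strip st.2] else st.1), p)
  else if st.2 ≠ [] then (st.1, st.2 ++ ['\n', '\n'] ++ p)
  else (st.1, p)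

def split_into_passages (content : String) (min_length : Int) (max_length : Int) : List String :=
  let paragraphs := PySem.Chars.splitOn content.toList ['\n', '\n']
  let st := paragraphs.foldl (fun st q =>
      let paragraph := PySem.Chars.strip q
      if paragraph = [] then st else pvStepA min_length max_length st paragraph)
    ([], [])
  let passages := if min_length ≤ (st.2.length : Int) then st.1 ++ [PySem.Chars.strip st.2] else st.1
  passages.map String.ofList

-- ===== PORT B =====
-- the while-loop of take_group: extend the group while the joined length stays ≤ max_length;
-- returns (paragraphs taken, remaining paragraphs)
def pvTake (max_length : Int) : Int → List (List Char) → List (List Char) × List (List Char)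
  | _, [] => ([], [])
  | len0, p :: t =>
    if len0 + (p.length : Int) ≤ max_length then
      let r := pvTake max_length (len0 + 2 + (p.length : Int)) t
      (p :: r.1, r.2)
    else ([], p :: t)

-- the outer while-loop: peel one group (seeded with the first paragraph) per step;
-- the fuel argument (one unit per peeled group, items.length suffices since each group
-- consumes its seed) only makes the same recursion structural
def pvGoFuel (max_length : Int) : Nat → List (List Char) → List (List Char)
  | _, [] => []
  | 0, _ :: _ => []
  | fuel + 1, p :: t =>
    let gr := pvTake max_length ((p.length : Int)) t
    PySem.Chars.join ['\n', '\n'] (p :: gr.1) :: pvGoFuel max_length fuel gr.2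

def pvGo (max_length : Int) (items : List (List Char)) : List (List Char) :=
  pvGoFuel max_length items.length items

def split_into_passages_alt (content : String) (min_length : Int) (max_length : Int) : List String :=
  let paras := ((PySem.Chars.splitOn content.toList ['\n', '\n']).map PySem.Chars.strip).filter (· ≠ [])
  let passages := pvGo max_length paras
  (passages.filter (fun s => min_length ≤ (s.length : Int))).map String.ofList

-- ===== PRECONDITION & SPEC =====
-- When min_length ≤ 0 and the content has no non-empty stripped paragraph or its first one
-- alone exceeds max_length, A prepends a spurious empty-string passage (its stripped empty
-- initial accumulator) to the result; B omits it, since an empty passage is never an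
-- intended output of a text splitter.
def D_split_into_passages (content : String) (min_length : Int) (max_length : Int) : Prop :=
  min_length ≤ 0 ∧
  (((PySem.Str.split? content "\n\n").getD []).find?
      (fun q => PySem.Str.strip q ≠ "")).all
    (fun q => max_length < PySem.Str.len (PySem.Str.strip q)) = true
instance (content : String) (min_length : Int) (max_length : Int) : Decidable (D_split_into_passages content min_length max_length) := by unfold D_split_into_passages; infer_instance

def Spec_split_into_passages (content : String) (min_length : Int) (max_length : Int) (out : List String) : Prop := ¬ D_split_into_passages content min_length max_length → out = split_into_passages_alt content min_length max_length
instance (content : String) (min_length : Int) (max_length : Int) (out : List String) : Decidable (Spec_split_into_passages content min_length max_length out) := by unfold Spec_split_into_passages; infer_instance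

def pvDiffWitness_split_into_passages : String × Int × Int := ("hey", 0, 2)
def pvDiffWitnessOut_split_into_passages : (List String) × (List String) := (["", "hey"], ["hey"])

-- ===== CLAIM (what is proved, stated in full; the proofs are below) =====
def Claim_unchanged_split_into_passages : Prop := ∀ (content : String) (min_length : Int) (max_length : Int), Dom_split_into_passages content min_length max_length → Spec_split_into_passages content min_length max_length (split_into_passages content min_length max_length)
def Claim_changed_split_into_passages : Prop := Dom_split_into_passages (pvDiffWitness_split_into_passages.1) (pvDiffWitness_split_into_passages.2.1) (pvDiffWitness_split_into_passages.2.2) ∧ D_split_into_passages (pvDiffWitness_split_into_passages.1) (pvDiffWitness_split_into_passages.2.1) (pvDiffWitness_split_into_passages.2.2) ∧ split_into_passages (pvDiffWitness_split_into_passages.1) (pvDiffWitness_split_into_passages.2.1) (pvDiffWitness_split_into_passages.2.2) = pvDiffWitnessOut_split_into_passages.1 ∧ split_into_passages_alt (pvDiffWitness_split_into_passages.1) (pvDiffWitness_split_into_passages.2.1) (pvDiffWitness_split_into_passages.2.2) = pvDiffWitnessOut_split_into_passages.2 ∧ pvDiffWitnessOut_split_into_passages.1 ≠ pvDiffWitn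essOut_split_into_passages.2
def Claim_exact_split_into_passages : Prop := ∀ (content : String) (min_length : Int) (max_length : Int), Dom_split_into_passages content min_length max_length → D_split_into_passages content min_length max_length → split_into_passages content min_length max_length ≠ split_into_passages_alt content min_length max_length

-- ===== LEMMAS AND PROOFS =====

-- the state of the proof's middle form of the loop (groups of paragraphs, as in the
-- previous segmentation-first reading of A): (closed groups, current group, joined length)
def pvStepB (max_length : Int) (st : List (List (List Char)) × List (List Char) × Int) (p : List Char) :
    List (List (List Char)) × List (List Char) × Int :=
  if max_length < st.2.2 + (p.length : Int) then
    (st.1 ++ [st.2.1], [p], (p.length : Int))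
  else
    (st.1, st.2.1 ++ [p], st.2.2 + (if st.2.1 = [] then (p.length : Int) else 2 + (p.length : Int)))

lemma pvTake_rest_le (max_length : Int) :
    ∀ (len0 : Int) (items : List (List Char)),
      (pvTake max_length len0 items).2.length ≤ items.length := by
  intro len0 items
  induction items generalizing len0 with
  | nil => simp [pvTake]
  | cons p t ih =>
    simp only [pvTake]
    split_ifs
    · exact le_trans (ih _) (Nat.le_succ _)
    · exact le_refl _

lemma pvGoFuel_nil (max_length : Int) (fuel : Nat) : pvGoFuel max_length fuel [] = [] := by
  cases fuel <;> rfl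

lemma pvGoFuel_congr (max_length : Int) :
    ∀ (fuel1 fuel2 : Nat) (items : List (List Char)),
      items.length ≤ fuel1 → items.length ≤ fuel2 →
      pvGoFuel max_length fuel1 items = pvGoFuel max_length fuel2 items := by
  intro fuel1
  induction fuel1 with
  | zero =>
    intro fuel2 items h1 _
    cases items with
    | nil => rw [pvGoFuel_nil, pvGoFuel_nil]
    | cons p t => simp at h1
  | succ fuel1 ih =>
    intro fuel2 items h1 h2
    cases items with
    | nil => rw [pvGoFuel_nil, pvGoFuel_nil]
    | cons p t =>
      cases fuel2 with
      | zero => simp at h2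
      | succ fuel2 =>
        simp only [pvGoFuel]
        have ht1 : t.length ≤ fuel1 := by simpa using h1
        have ht2 : t.length ≤ fuel2 := by simpa using h2
        exact congrArg _ (ih fuel2 _
          (le_trans (pvTake_rest_le _ _ _) ht1)
          (le_trans (pvTake_rest_le _ _ _) ht2))

lemma pvGo_cons (max_length : Int) (p : List Char) (t : List (List Char)) :
    pvGo max_length (p :: t)
      = PySem.Chars.join ['\n', '\n'] (p :: (pvTake max_length ((p.length : Int)) t).1)
        :: pvGo max_length (pvTake max_length ((p.length : Int)) t).2 := by
  unfold pvGo
  simp only [List.length_cons, pvGoFuel]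
  exact congrArg _ (pvGoFuel_congr _ _ _ _ (pvTake_rest_le _ _ _) (le_refl _))

-- a string that starts and ends with a non-whitespace character (the shape of a
-- stripped non-empty paragraph, and of a join of such paragraphs)
def pvGood (cs : List Char) : Prop :=
  (∃ c, cs.head? = some c ∧ PySem.Chars.isspace c = false) ∧
  (∃ d, cs.getLast? = some d ∧ PySem.Chars.isspace d = false)

lemma pvGood_ne_nil {cs : List Char} (h : pvGood cs) : cs ≠ [] := by
  obtain ⟨⟨c, hc, _⟩, _⟩ := h
  intro he; simp [he] at hc

lemma pvGood_strip_eq {cs : List Char} (h : pvGood cs) : PySem.Chars.strip cs = cs := by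
  obtain ⟨⟨c, hc, hcs⟩, ⟨d, hd, hds⟩⟩ := h
  cases cs with
  | nil => simp at hc
  | cons a t =>
    simp only [List.head?_cons, Option.some.injEq] at hc
    have hcs' : PySem.Chars.isspace a = false := by rw [hc]; exact hcs
    have h1 : PySem.Chars.lstrip (a :: t) = a :: t := by
      simp [PySem.Chars.lstrip, hcs']
    obtain ⟨u, hu⟩ : ∃ u, (a :: t).reverse = d :: u := by
      have hrev : (a :: t).reverse.head? = some d := by rw [List.head?_reverse]; exact hd
      cases hr : (a :: t).reverse with
      | nil => rw [hr] at hrev; simp at hrev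
      | cons b u =>
        rw [hr] at hrev
        simp only [List.head?_cons, Option.some.injEq] at hrev
        exact ⟨u, by rw [hrev]⟩
    have h2 : PySem.Chars.rstrip (a :: t) = a :: t := by
      unfold PySem.Chars.rstrip
      rw [hu, List.dropWhile_cons, if_neg (by simp [hds]), ← hu, List.reverse_reverse]
    show PySem.Chars.rstrip (PySem.Chars.lstrip (a :: t)) = a :: t
    rw [h1, h2]

lemma pvHead?_of_prefix {a b : List Char} (h : a <+: b) (ha : a ≠ []) : b.head? = a.head? := by
  obtain ⟨s, rfl⟩ := h
  cases a with
  | nil => exact absurd rfl ha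
  | cons x t => simp

lemma pvGood_of_strip_ne {q : List Char} (h : PySem.Chars.strip q ≠ []) :
    pvGood (PySem.Chars.strip q) := by
  have hs : PySem.Chars.strip q
      = (List.dropWhile PySem.Chars.isspace (PySem.Chars.lstrip q).reverse).reverse := rfl
  have hx : List.dropWhile PySem.Chars.isspace (PySem.Chars.lstrip q).reverse ≠ [] := by
    intro he; rw [hs, he] at h; simp at h
  constructor
  · have hpre : PySem.Chars.strip q <+: PySem.Chars.lstrip q := by
      rw [hs]
      have := List.dropWhile_suffix (l := (PySem.Chars.lstrip q).reverse) PySem.Chars.isspace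
      have := this.reverse
      rwa [List.reverse_reverse] at this
    have hy : PySem.Chars.lstrip q ≠ [] := by
      intro he; rw [he] at hpre; exact h (List.prefix_nil.mp hpre)
    refine ⟨(PySem.Chars.lstrip q).head hy, ?_, ?_⟩
    · rw [← pvHead?_of_prefix hpre h, List.head?_eq_some_head hy]
    · have := List.head_dropWhile_not (l := q) PySem.Chars.isspace (by exact hy)
      simpa [PySem.Chars.lstrip] using this
  · refine ⟨(List.dropWhile PySem.Chars.isspace (PySem.Chars.lstrip q).reverse).head hx, ?_, ?_⟩
    · rw [hs, List.getLast?_reverse, List.head?_eq_some_head hx]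
    · exact List.head_dropWhile_not PySem.Chars.isspace hx

lemma pvGood_append (sep : List Char) {a b : List Char} (ha : pvGood a) (hb : pvGood b) :
    pvGood (a ++ sep ++ b) := by
  obtain ⟨⟨c, hc, hcs⟩, _⟩ := ha
  obtain ⟨_, ⟨d, hd, hds⟩⟩ := hb
  constructor
  · exact ⟨c, by rw [List.append_assoc, List.head?_append, hc]; rfl, hcs⟩
  · refine ⟨d, ?_, hds⟩
    rw [List.getLast?_append, hd]; rfl

lemma pvGood_join {g : List (List Char)} (hg : ∀ p ∈ g, pvGood p) (hne : g ≠ []) :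
    pvGood (PySem.Chars.join ['\n', '\n'] g) := by
  induction g with
  | nil => exact absurd rfl hne
  | cons p r ih =>
    cases r with
    | nil => rw [PySem.Chars.join_singleton]; exact hg p (by simp)
    | cons q r' =>
      rw [PySem.Chars.join_cons_cons]
      exact pvGood_append _ (hg p (by simp)) (ih (fun x hx => hg x (by simp [hx])) (by simp))

lemma pvJoin_append_singleton (sep : List Char) :
    ∀ (xs : List (List Char)) (y : List Char),
      PySem.Chars.join sep (xs ++ [y])
        = if xs = [] then y else PySem.Chars.join sep xs ++ sep ++ y := by
  intro xs
  induction xs with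
  | nil => intro y; simp [PySem.Chars.join_singleton]
  | cons x xs ih =>
    intro y
    cases xs with
    | nil => simp [PySem.Chars.join_cons_cons, PySem.Chars.join_singleton]
    | cons x' xs' =>
      have h1 : (x :: x' :: xs') ++ [y] = x :: (x' :: (xs' ++ [y])) := by simp
      rw [h1, PySem.Chars.join_cons_cons]
      have h2 : x' :: (xs' ++ [y]) = (x' :: xs') ++ [y] := by simp
      rw [h2, ih y, if_neg (by simp), PySem.Chars.join_cons_cons]
      simp

lemma pvJoin_nil : PySem.Chars.join ['\n', '\n'] [] = [] := PySem.Chars.join_nil _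

lemma pvStrip_nil : PySem.Chars.strip [] = [] := rfl

lemma pvFoldFilter {β : Type} (g : β → List Char → β) :
    ∀ (qs : List (List Char)) (st : β),
      qs.foldl (fun st q =>
          let p := PySem.Chars.strip q
          if p = [] then st else g st p) st
        = (((qs.map PySem.Chars.strip).filter (· ≠ [])).foldl g st) := by
  intro qs
  induction qs with
  | nil => intro st; rfl
  | cons q qs ih =>
    intro st
    by_cases hq : PySem.Chars.strip q = [] <;>
      simp [List.foldl_cons, hq, ih]

-- the joint loop invariant: A's state is the min-filtered joined image of the middle
-- (group-list) state
lemma pvMain (min_length max_length : Int) :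
    ∀ (paras : List (List Char)), (∀ p ∈ paras, pvGood p) →
    ∀ (closed : List (List (List Char))) (cur : List (List Char)), (∀ p ∈ cur, pvGood p) →
    (let stA := paras.foldl (pvStepA min_length max_length)
        ((closed.map (PySem.Chars.join ['\n', '\n'])).filter (fun s => min_length ≤ (s.length : Int)),
         PySem.Chars.join ['\n', '\n'] cur)
     if min_length ≤ (stA.2.length : Int) then stA.1 ++ [PySem.Chars.strip stA.2] else stA.1)
    = (let stB := paras.foldl (pvStepB max_length)
        (closed, cur, ((PySem.Chars.join ['\n', '\n'] cur).length : Int))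
       ((stB.1 ++ [stB.2.1]).map (PySem.Chars.join ['\n', '\n'])).filter
         (fun s => min_length ≤ (s.length : Int))) := by
  intro paras
  induction paras with
  | nil =>
    intro _ closed cur hcur
    simp only [List.foldl_nil, List.map_append, List.filter_append, List.map_cons,
      List.map_nil]
    have hstrip : PySem.Chars.strip (PySem.Chars.join ['\n', '\n'] cur)
        = PySem.Chars.join ['\n', '\n'] cur := by
      by_cases hc : cur = []
      · rw [hc, pvJoin_nil, pvStrip_nil]
      · exact pvGood_strip_eq (pvGood_join hcur hc)
    by_cases hmin : min_length ≤ ((PySem.Chars.join ['\n', '\n'] cur).length : Int) <;>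
      simp [hmin, hstrip]
  | cons p paras ih =>
    intro hg closed cur hcur
    have hp : pvGood p := hg p (by simp)
    have hg' : ∀ x ∈ paras, pvGood x := fun x hx => hg x (by simp [hx])
    simp only [List.foldl_cons]
    by_cases hbr : max_length <
        ((PySem.Chars.join ['\n', '\n'] cur).length : Int) + (p.length : Int)
    · -- close the current group
      have hstrip : PySem.Chars.strip (PySem.Chars.join ['\n', '\n'] cur)
          = PySem.Chars.join ['\n', '\n'] cur := by
        by_cases hc : cur = []
        · rw [hc, pvJoin_nil, pvStrip_nil]
        · exact pvGood_strip_eq (pvGood_join hcur hc)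
      have hA : pvStepA min_length max_length
          ((closed.map (PySem.Chars.join ['\n', '\n'])).filter
            (fun s => min_length ≤ (s.length : Int)),
           PySem.Chars.join ['\n', '\n'] cur) p
          = (((closed ++ [cur]).map (PySem.Chars.join ['\n', '\n'])).filter
              (fun s => min_length ≤ (s.length : Int)),
             PySem.Chars.join ['\n', '\n'] [p]) := by
        simp only [pvStepA, if_pos hbr, hstrip, List.map_append, List.filter_append,
          List.map_cons, List.map_nil, PySem.Chars.join_singleton]
        by_cases hmin : min_length ≤ ((PySem.Chars.join ['\n', '\n'] cur).length : Int) <;>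
          simp [hmin]
      have hB : pvStepB max_length
          (closed, cur, ((PySem.Chars.join ['\n', '\n'] cur).length : Int)) p
          = (closed ++ [cur], [p], ((PySem.Chars.join ['\n', '\n'] [p]).length : Int)) := by
        simp only [pvStepB, if_pos hbr, PySem.Chars.join_singleton]
      rw [hA, hB]
      exact ih hg' (closed ++ [cur]) [p] (by simpa using hp)
    · -- extend the current group
      by_cases hc : cur = []
      · subst hc
        have hA : pvStepA min_length max_length
            ((closed.map (PySem.Chars.join ['\n', '\n'])).filter
              (fun s => min_length ≤ (s.length : Int)),
             PySem.Chars.join ['\n', '\n'] []) p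
            = ((closed.map (PySem.Chars.join ['\n', '\n'])).filter
                (fun s => min_length ≤ (s.length : Int)),
               PySem.Chars.join ['\n', '\n'] [p]) := by
          simp only [pvStepA, pvJoin_nil] at hbr ⊢
          rw [if_neg (by simpa using hbr)]
          simp [PySem.Chars.join_singleton]
        have hB : pvStepB max_length
            (closed, ([] : List (List Char)),
              ((PySem.Chars.join ['\n', '\n'] []).length : Int)) p
            = (closed, [p], ((PySem.Chars.join ['\n', '\n'] [p]).length : Int)) := by
          simp only [pvStepB, pvJoin_nil] at hbr ⊢
          rw [if_neg (by simpa using hbr)]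
          simp [PySem.Chars.join_singleton]
        rw [hA, hB]
        exact ih hg' closed [p] (by simpa using hp)
      · have hjoin : PySem.Chars.join ['\n', '\n'] (cur ++ [p])
            = PySem.Chars.join ['\n', '\n'] cur ++ ['\n', '\n'] ++ p := by
          rw [pvJoin_append_singleton, if_neg hc]
        have hne : PySem.Chars.join ['\n', '\n'] cur ≠ [] :=
          pvGood_ne_nil (pvGood_join hcur hc)
        have hA : pvStepA min_length max_length
            ((closed.map (PySem.Chars.join ['\n', '\n'])).filter
              (fun s => min_length ≤ (s.length : Int)),
             PySem.Chars.join ['\n', '\n'] cur) p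
            = ((closed.map (PySem.Chars.join ['\n', '\n'])).filter
                (fun s => min_length ≤ (s.length : Int)),
               PySem.Chars.join ['\n', '\n'] (cur ++ [p])) := by
          simp only [pvStepA]
          rw [if_neg hbr, if_pos (by simpa using hne), hjoin]
        have hB : pvStepB max_length
            (closed, cur, ((PySem.Chars.join ['\n', '\n'] cur).length : Int)) p
            = (closed, cur ++ [p],
               ((PySem.Chars.join ['\n', '\n'] (cur ++ [p])).length : Int)) := by
          simp only [pvStepB]
          rw [if_neg hbr, if_neg hc, hjoin]
          simp only [Prod.mk.injEq, List.length_append, List.length_cons, List.length_nil]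
          refine ⟨trivial, trivial, ?_⟩
          push_cast
          ring
        rw [hA, hB]
        refine ih hg' closed (cur ++ [p]) ?_
        intro x hx
        rcases List.mem_append.mp hx with h | h
        · exact hcur x h
        · simpa [List.mem_singleton.mp h] using hp

-- the middle group-list fold, continued from a non-empty current group, is the taken
-- extension of that group followed by pvGo on the remainder
lemma pvMid (max_length : Int) :
    ∀ (items : List (List Char)) (closed : List (List (List Char))) (cur : List (List Char)),
      cur ≠ [] →
      (let st := items.foldl (pvStepB max_length)
          (closed, cur, ((PySem.Chars.join ['\n', '\n'] cur).length : Int))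
       (st.1 ++ [st.2.1]).map (PySem.Chars.join ['\n', '\n']))
      = closed.map (PySem.Chars.join ['\n', '\n'])
        ++ PySem.Chars.join ['\n', '\n']
             (cur ++ (pvTake max_length ((PySem.Chars.join ['\n', '\n'] cur).length : Int) items).1)
           :: pvGo max_length
             (pvTake max_length ((PySem.Chars.join ['\n', '\n'] cur).length : Int) items).2 := by
  intro items
  induction items with
  | nil =>
    intro closed cur _
    simp [pvTake, pvGo, pvGoFuel_nil]
  | cons p t ih =>
    intro closed cur hc
    simp only [List.foldl_cons]
    by_cases hbr : max_length <
        ((PySem.Chars.join ['\n', '\n'] cur).length : Int) + (p.length : Int)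
    · -- group closes: pvTake refuses p
      have hB : pvStepB max_length
          (closed, cur, ((PySem.Chars.join ['\n', '\n'] cur).length : Int)) p
          = (closed ++ [cur], [p], ((PySem.Chars.join ['\n', '\n'] [p]).length : Int)) := by
        simp only [pvStepB, if_pos hbr, PySem.Chars.join_singleton]
      rw [hB]
      have := ih (closed ++ [cur]) [p] (by simp)
      rw [this]
      have hT : pvTake max_length ((PySem.Chars.join ['\n', '\n'] cur).length : Int) (p :: t)
          = ([], p :: t) := by
        simp only [pvTake]
        rw [if_neg (by omega)]
      rw [hT]
      rw [pvGo_cons]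
      simp [PySem.Chars.join_singleton]
    · -- group extends: pvTake accepts p
      have hjoin : PySem.Chars.join ['\n', '\n'] (cur ++ [p])
          = PySem.Chars.join ['\n', '\n'] cur ++ ['\n', '\n'] ++ p := by
        rw [pvJoin_append_singleton, if_neg hc]
      have hlen : ((PySem.Chars.join ['\n', '\n'] (cur ++ [p])).length : Int)
          = ((PySem.Chars.join ['\n', '\n'] cur).length : Int) + 2 + (p.length : Int) := by
        rw [hjoin]
        simp only [List.length_append, List.length_cons, List.length_nil]
        push_cast; ring
      have hB : pvStepB max_length
          (closed, cur, ((PySem.Chars.join ['\n', '\n'] cur).length : Int)) p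
          = (closed, cur ++ [p], ((PySem.Chars.join ['\n', '\n'] (cur ++ [p])).length : Int)) := by
        simp only [pvStepB]
        rw [if_neg hbr, if_neg hc, hlen]
        simp only [Prod.mk.injEq]
        refine ⟨trivial, trivial, by ring⟩
      rw [hB]
      have := ih closed (cur ++ [p]) (by simp)
      rw [this]
      have hT : pvTake max_length ((PySem.Chars.join ['\n', '\n'] cur).length : Int) (p :: t)
          = (p :: (pvTake max_length ((PySem.Chars.join ['\n', '\n'] (cur ++ [p])).length : Int) t).1,
             (pvTake max_length ((PySem.Chars.join ['\n', '\n'] (cur ++ [p])).length : Int) t).2) := by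
        simp only [pvTake]
        rw [if_pos (by omega), hlen]
      rw [hT]
      simp

-- the joined middle group list is pvGo, with a leading "" group exactly when the first
-- paragraph (if any) does not fit on its own
lemma pvTop (max_length : Int) (paras : List (List Char)) :
    (let st := paras.foldl (pvStepB max_length) ([], [], 0)
     (st.1 ++ [st.2.1]).map (PySem.Chars.join ['\n', '\n']))
    = if paras = [] ∨ max_length < ((paras.headD []).length : Int)
      then [] :: pvGo max_length paras
      else pvGo max_length paras := by
  cases paras with
  | nil => simp [pvGo, pvGoFuel]
  | cons p t =>
    simp only [List.foldl_cons, List.headD_cons]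
    by_cases hbr : max_length < ((p.length : Int))
    · have hB : pvStepB max_length ([], [], 0) p
          = ([[]], [p], ((PySem.Chars.join ['\n', '\n'] [p]).length : Int)) := by
        simp only [pvStepB, PySem.Chars.join_singleton]
        rw [if_pos (by omega)]
        simp
      rw [hB, pvMid max_length t [[]] [p] (by simp)]
      rw [if_pos (Or.inr hbr)]
      rw [pvGo_cons]
      simp [PySem.Chars.join_singleton]
    · have hB : pvStepB max_length ([], [], 0) p
          = ([], [p], ((PySem.Chars.join ['\n', '\n'] [p]).length : Int)) := by
        simp only [pvStepB, PySem.Chars.join_singleton]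
        rw [if_neg (by omega)]
        simp
      rw [hB, pvMid max_length t [] [p] (by simp)]
      rw [if_neg (by simp; omega)]
      rw [pvGo_cons]
      simp [PySem.Chars.join_singleton]

-- the D_ condition (stated over String paragraphs) in the char-list form the proofs use
lemma pvStrEmpty_iff (t : String) : t = "" ↔ t.toList = [] := by
  rw [← String.toList_inj]; rfl

lemma pvFindBridge (max_length : Int) :
    ∀ (parts : List String),
      (((parts.find? (fun q => PySem.Str.strip q ≠ "")).all
          (fun q => max_length < PySem.Str.len (PySem.Str.strip q))) = true)
      ↔ ((((parts.map String.toList).map PySem.Chars.strip).filter (· ≠ [])) = []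
          ∨ max_length <
            (((((parts.map String.toList).map PySem.Chars.strip).filter (· ≠ [])).headD []).length : Int)) := by
  intro parts
  induction parts with
  | nil => simp
  | cons q t ih =>
    by_cases hq : PySem.Chars.strip q.toList = []
    · have hq' : PySem.Str.strip q = "" := by
        rw [pvStrEmpty_iff, PySem.Str.toList_strip, hq]
      have hpred : (decide (PySem.Str.strip q ≠ "")) = false := by simp [hq']
      simp only [List.map_cons, List.filter_cons, List.find?_cons, hpred]
      rw [if_neg (by simp [hq])]
      exact ih
    · have hq' : ¬ PySem.Str.strip q = "" := by
        rw [pvStrEmpty_iff, PySem.Str.toList_strip]; exact hq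
      have hpred : (decide (PySem.Str.strip q ≠ "")) = true := by
        simp only [decide_eq_true_eq]; exact hq'
      simp only [List.map_cons, List.filter_cons, List.find?_cons, hpred]
      rw [if_pos (by simp [hq])]
      simp only [Option.all_some, decide_eq_true_eq, PySem.Str.len_eq,
        PySem.Str.toList_strip, List.headD_cons]
      constructor
      · intro h; exact Or.inr h
      · intro h
        rcases h with h | h
        · exact absurd h (by simp)
        · exact h

lemma pvD_iff (content : String) (min_length max_length : Int) :
    D_split_into_passages content min_length max_length
    ↔ (min_length ≤ 0 ∧
        ((((PySem.Chars.splitOn content.toList ['\n', '\n']).map PySem.Chars.strip).filter (· ≠ [])) = []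
          ∨ max_length <
            ((((((PySem.Chars.splitOn content.toList ['\n', '\n']).map PySem.Chars.strip).filter (· ≠ []))).headD []).length : Int))) := by
  unfold D_split_into_passages
  have hsplit : ∃ parts, PySem.Str.split? content "\n\n" = some parts
      ∧ parts.map String.toList = PySem.Chars.splitOn content.toList ['\n', '\n'] := by
    have h1 := PySem.Str.split?_map content "\n\n"
    have h2 : PySem.Chars.split? content.toList ("\n\n".toList)
        = some (PySem.Chars.splitOn content.toList ['\n', '\n']) := by
      simp [PySem.Chars.split?, PySem.Chars.splitOn]
    rw [h2] at h1
    cases hs : PySem.Str.split? content "\n\n" with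
    | none => rw [hs] at h1; simp at h1
    | some parts =>
      rw [hs] at h1
      exact ⟨parts, rfl, by simpa using h1⟩
  obtain ⟨parts, hs, hmap⟩ := hsplit
  rw [hs]
  simp only [Option.getD_some]
  rw [← hmap]
  exact and_congr_right (fun _ => pvFindBridge max_length parts)

-- A's output as the min-filtered joined middle group list (chars, before String.ofList)
lemma pvAchars (content : String) (min_length max_length : Int) :
    split_into_passages content min_length max_length
    = (let paras := ((PySem.Chars.splitOn content.toList ['\n', '\n']).map
          PySem.Chars.strip).filter (· ≠ [])
       ((if paras = [] ∨ max_length < ((paras.headD []).length : Int)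
          then [] :: pvGo max_length paras
          else pvGo max_length paras).filter
            (fun s => min_length ≤ (s.length : Int))).map String.ofList) := by
  unfold split_into_passages
  simp only []
  rw [pvFoldFilter (pvStepA min_length max_length)]
  congr 1
  have hgoods : ∀ p ∈ ((PySem.Chars.splitOn content.toList ['\n', '\n']).map
      PySem.Chars.strip).filter (· ≠ []), pvGood p := by
    intro p hp
    rw [List.mem_filter] at hp
    obtain ⟨hp1, hp2⟩ := hp
    obtain ⟨q, _, rfl⟩ := List.mem_map.mp hp1
    exact pvGood_of_strip_ne (by simpa using hp2)
  have h1 := pvMain min_length max_length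
    (((PySem.Chars.splitOn content.toList ['\n', '\n']).map PySem.Chars.strip).filter (· ≠ []))
    hgoods [] [] (by simp)
  have h2 := pvTop max_length
    (((PySem.Chars.splitOn content.toList ['\n', '\n']).map PySem.Chars.strip).filter (· ≠ []))
  simp only [pvJoin_nil, List.length_nil, Nat.cast_zero, List.map_nil, List.filter_nil] at h1 h2
  rw [h1, h2]

-- ===== VERDICT (by name: the statement is the Claim_ definition above) =====
theorem split_into_passages_spec : Claim_unchanged_split_into_passages := by
  intro content min_length max_length _ hD
  show _ = _
  rw [pvAchars]
  unfold split_into_passages_alt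
  simp only []
  rw [pvD_iff] at hD
  simp only [not_and_or] at hD
  by_cases hcond : (((PySem.Chars.splitOn content.toList ['\n', '\n']).map
      PySem.Chars.strip).filter (· ≠ [])) = []
      ∨ max_length < ((((((PySem.Chars.splitOn content.toList ['\n', '\n']).map
        PySem.Chars.strip).filter (· ≠ []))).headD []).length : Int)
  · rw [if_pos hcond]
    have hmin : ¬ min_length ≤ 0 := by
      rcases hD with h | h
      · exact h
      · exact absurd hcond h
    simp only [List.filter_cons, List.length_nil, Nat.cast_zero]
    rw [if_neg (by simpa using hmin)]
  · rw [if_neg hcond]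

theorem split_into_passages_changed : Claim_changed_split_into_passages := by
  unfold Claim_changed_split_into_passages; decide

theorem split_into_passages_tight : Claim_exact_split_into_passages := by
  intro content min_length max_length _ hD
  obtain ⟨hmin, hcond⟩ := (pvD_iff content min_length max_length).mp hD
  rw [pvAchars]
  unfold split_into_passages_alt
  simp only []
  rw [if_pos hcond]
  simp only [List.filter_cons, List.length_nil, Nat.cast_zero]
  rw [if_pos (by simpa using hmin)]
  intro h
  have := congrArg List.length h
  simp at this
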